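-- pv_equiv track=rewrite | github.com/SanJinYe/Xplainer_demo | tailevents/indexer/ast_analyzer.py | _build_file_name_index
-- ===== SOURCE A (Python) =====
-- from typing import Any, Optional
--
-- def _build_file_name_index(
--
--     entity_files: dict[str, str],
--     file_path: str,
-- ) -> dict[str, Optional[str]]:
--     index: dict[str, Optional[str]] = {}
--     for qualified_name, candidate_file_path in entity_files.items():
--         if candidate_file_path != file_path:
--             continue
--         short_name = qualified_name.rsplit(".", 1)[-1]
--         if short_name not in index:
--             index[short_name] = qualified_name
--         elif index[short_name] != qualified_name:
--             index[short_name] = None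
--     return index
-- ===== SOURCE B (Python) =====
-- def _build_file_name_index(entity_files, file_path):
--     groups: dict[str, list] = {}
--     for qualified_name, candidate_file_path in entity_files.items():
--         if candidate_file_path == file_path:
--             groups.setdefault(qualified_name.rsplit(".", 1)[-1], []).append(qualified_name)
--     index = {}
--     for short_name, names in groups.items():
--         distinct = list(dict.fromkeys(names))
--         index[short_name] = distinct[0] if len(distinct) == 1 else None
--     return index
-- ===== Notes on version B (the rewrite author's own statement) =====
-- stated objective: alternative
-- what changed: A decides first-seen/conflict on the fly while inserting into the index; B first collects all matching qualified names into groups keyed by short name, then collapses each group to its single distinct name or None in a separate pass.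
import Mathlib
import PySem

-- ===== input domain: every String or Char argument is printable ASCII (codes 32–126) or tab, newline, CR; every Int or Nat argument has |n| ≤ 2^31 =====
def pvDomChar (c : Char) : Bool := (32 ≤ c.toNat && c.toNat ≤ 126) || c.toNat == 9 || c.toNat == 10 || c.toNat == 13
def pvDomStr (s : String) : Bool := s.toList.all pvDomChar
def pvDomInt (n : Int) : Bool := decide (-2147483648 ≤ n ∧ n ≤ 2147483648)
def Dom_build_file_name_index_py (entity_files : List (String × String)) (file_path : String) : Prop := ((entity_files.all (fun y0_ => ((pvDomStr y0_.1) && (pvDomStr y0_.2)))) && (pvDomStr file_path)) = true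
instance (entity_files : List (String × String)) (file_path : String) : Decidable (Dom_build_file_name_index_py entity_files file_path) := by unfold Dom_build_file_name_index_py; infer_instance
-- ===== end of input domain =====

-- B replaces A's on-the-fly first-seen/conflict update with a collect-then-collapse
-- two-pass structure (group qualified names by short name, then collapse each group);
-- objective: alternative decomposition, same cost.

-- qualified_name.rsplit(".", 1)[-1] : the suffix after the LAST '.', or the whole
-- string when there is no '.'.  Ported by hand (exact for a single-char separator):
def pvShortName (s : String) : String :=
  String.ofList ((s.toList.reverse.takeWhile (fun c => c ≠ '.')).reverse)

-- ===== PORT A =====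
def pvStepA (file_path : String) (d : PySem.Dict String (Option String))
    (p : String × String) : PySem.Dict String (Option String) :=
  if p.2 ≠ file_path then d
  else
    let sn := pvShortName p.1
    if d.contains sn = false then d.insert sn (some p.1)
    else if d.getD sn none ≠ some p.1 then d.insert sn none
    else d

def build_file_name_index_py (entity_files : List (String × String)) (file_path : String) : List (String × Option String) :=
  (entity_files.foldl (pvStepA file_path) PySem.Dict.empty).items

-- ===== PORT B =====
-- list(dict.fromkeys(names)) is PySem.Set.ofList; distinct[0] if len(distinct)==1 else None:
def pvCollapse (names : List String) : Option String :=
  match PySem.Set.ofList names with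
  | [n] => some n
  | _ => none

-- groups.setdefault(sn, []).append(qn) is Dict.modify sn [] (· ++ [qn])
def pvStepB (file_path : String) (g : PySem.Dict String (List String))
    (p : String × String) : PySem.Dict String (List String) :=
  if p.2 == file_path then g.modify (pvShortName p.1) [] (fun ns => ns ++ [p.1]) else g

def build_file_name_index_py_alt (entity_files : List (String × String)) (file_path : String) : List (String × Option String) :=
  ((entity_files.foldl (pvStepB file_path) PySem.Dict.empty).items).map
    (fun q => (q.1, pvCollapse q.2))

-- ===== PRECONDITION & SPEC =====
def Spec_build_file_name_index_py (entity_files : List (String × String)) (file_path : String) (out : List (String × Option String)) : Prop := out = build_file_name_index_py_alt entity_files file_path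
instance (entity_files : List (String × String)) (file_path : String) (out : List (String × Option String)) : Decidable (Spec_build_file_name_index_py entity_files file_path out) := by unfold Spec_build_file_name_index_py; infer_instance

-- ===== CLAIM (what is proved, stated in full; the proofs are below) =====
def Claim_equal_build_file_name_index_py : Prop := ∀ (entity_files : List (String × String)) (file_path : String), Dom_build_file_name_index_py entity_files file_path → Spec_build_file_name_index_py entity_files file_path (build_file_name_index_py entity_files file_path)

-- ===== LEMMAS AND PROOFS =====

lemma pvCollapse_singleton (x : String) : pvCollapse [x] = some x := by
  simp [pvCollapse, PySem.Set.ofList_cons, PySem.Set.discard]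

-- two items of a nodup-keys dict with the same key have the same value
lemma pv_value_unique (g : PySem.Dict String (List String)) {k : String} {v w : List String}
    (h3 : g.keys.Nodup) (hv : (k, v) ∈ g.items) (hw : (k, w) ∈ g.items) : v = w := by
  have h1 := PySem.Dict.getD_of_mem_items g hv h3 []
  have h2 := PySem.Dict.getD_of_mem_items g hw h3 []
  rw [h1] at h2; exact h2

lemma pvCollapse_append_none {v : List String} (x : String)
    (hne : v ≠ []) (hx : pvCollapse v ≠ some x) : pvCollapse (v ++ [x]) = none := by
  unfold pvCollapse at *
  rw [PySem.Set.ofList_append_singleton, PySem.Set.add_eq_ite]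
  cases h : PySem.Set.ofList v with
  | nil =>
    exfalso
    cases v with
    | nil => exact hne rfl
    | cons a t => rw [PySem.Set.ofList_cons] at h; simp at h
  | cons m tl =>
    cases tl with
    | nil =>
      rw [h] at hx; simp at hx
      rw [if_neg (fun he => hx (List.mem_singleton.mp he).symm)]
      simp
    | cons m2 r =>
      split
      · rename_i n hn
        exfalso; split at hn <;> simp at hn
      · rfl

lemma pvCollapse_append_self {v : List String} {x : String}
    (hx : pvCollapse v = some x) : pvCollapse (v ++ [x]) = pvCollapse v := by
  unfold pvCollapse at *
  rw [PySem.Set.ofList_append_singleton, PySem.Set.add_eq_ite]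
  cases h : PySem.Set.ofList v with
  | nil => rw [h] at hx; simp at hx
  | cons m tl =>
    cases tl with
    | nil =>
      rw [h] at hx; simp at hx
      subst hx
      rw [if_pos (by simp)]
    | cons m2 r => rw [h] at hx; simp at hx

-- the invariant: A's running index is B's running groups, collapsed entrywise
lemma pv_inv_fold (file_path : String) (l : List (String × String))
    (g : PySem.Dict String (List String)) (d : PySem.Dict String (Option String))
    (h1 : d.items = g.items.map (fun q => (q.1, pvCollapse q.2)))
    (h2 : ∀ q ∈ g.items, q.2 ≠ [])
    (h3 : g.keys.Nodup) :
    (l.foldl (pvStepA file_path) d).items =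
      ((l.foldl (pvStepB file_path) g).items).map (fun q => (q.1, pvCollapse q.2)) := by
  induction l generalizing g d with
  | nil => simpa using h1
  | cons p t ih =>
    simp only [List.foldl_cons]
    by_cases hfp : p.2 = file_path
    · -- this entry is kept
      have hkeys : d.keys = g.keys := by
        simp only [PySem.Dict.keys, h1, List.map_map]; rfl
      have hdn : d.keys.Nodup := by rw [hkeys]; exact h3
      set sn := pvShortName p.1 with hsn
      have hcd : d.contains sn = g.contains sn := by
        by_cases hm : sn ∈ g.keys
        · rw [(PySem.Dict.contains_iff_mem_keys d sn).mpr (hkeys ▸ hm),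
              (PySem.Dict.contains_iff_mem_keys g sn).mpr hm]
        · have : d.contains sn ≠ true := fun hh => hm (hkeys ▸ (PySem.Dict.contains_iff_mem_keys d sn).mp hh)
          have : d.contains sn = false := by simpa using this
          rw [this]
          symm; simpa using fun hh => hm ((PySem.Dict.contains_iff_mem_keys g sn).mp hh)
      have hB : pvStepB file_path g p = g.insert sn (g.getD sn [] ++ [p.1]) := by
        simp [pvStepB, hfp, PySem.Dict.modify, hsn]
      by_cases hc : g.contains sn = true
      · -- key already present: A compares, B appends to the group
        obtain ⟨v, hv⟩ : ∃ v, (sn, v) ∈ g.items := by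
          have := (PySem.Dict.contains_iff_mem_keys g sn).mp hc
          simp only [PySem.Dict.keys, List.mem_map] at this
          obtain ⟨q, hq, hq1⟩ := this
          exact ⟨q.2, by rwa [show (sn, q.2) = q from by rw [← hq1]]⟩
        have hgetg : g.getD sn [] = v := PySem.Dict.getD_of_mem_items g hv h3 []
        have hvne : v ≠ [] := h2 _ hv
        have hdv : (sn, pvCollapse v) ∈ d.items := by
          rw [h1]; exact List.mem_map.mpr ⟨(sn, v), hv, rfl⟩
        have hgetd : d.getD sn none = pvCollapse v :=
          PySem.Dict.getD_of_mem_items d hdv hdn _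
        have hcd' : d.contains sn = true := by rw [hcd]; exact hc
        have hitemsB : (pvStepB file_path g p).items =
            g.items.map (fun q => if (q.1 == sn) = true then (sn, v ++ [p.1]) else q) := by
          rw [hB, hgetg]; exact PySem.Dict.items_insert_of_contains g _ hc
        have hnodupB : (pvStepB file_path g p).keys.Nodup := by
          rw [hB]; exact PySem.Dict.nodup_keys_insert g _ _ h3
        have hneB : ∀ q ∈ (pvStepB file_path g p).items, q.2 ≠ [] := by
          intro q hq
          rw [hitemsB] at hq
          obtain ⟨r, hr, hrq⟩ := List.mem_map.mp hq
          by_cases hk : (r.1 == sn) = true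
          · rw [hk] at hrq; simp only [if_true] at hrq
            rw [← hrq]; simp
          · rw [if_neg hk] at hrq; rw [← hrq]; exact h2 _ hr
        by_cases heq : pvCollapse v = some p.1
        · -- no conflict: A leaves the index unchanged
          have hA : pvStepA file_path d p = d := by
            simp [pvStepA, hfp, hcd', ← hsn, hgetd, heq]
          rw [hA]
          apply ih _ _ _ hneB hnodupB
          rw [h1, hitemsB, List.map_map]
          apply List.map_congr_left
          intro q hq
          by_cases hk : (q.1 == sn) = true
          · have hk' : q.1 = sn := by simpa using hk
            have hq' : (sn, q.2) ∈ g.items := by rw [← hk']; exact hq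
            have hq2 : q.2 = v := pv_value_unique g h3 hq' hv
            simp only [Function.comp, hk, if_true]
            rw [pvCollapse_append_self (by rw [← hq2] at heq ⊢; exact heq), hk', hq2]
          · have hk' : q.1 ≠ sn := by simpa using hk
            simp [hk']
        · -- conflict: A stores None, B's collapsed group is None
          have hA : pvStepA file_path d p = d.insert sn none := by
            simp [pvStepA, hfp, hcd', ← hsn, hgetd, heq]
          rw [hA]
          apply ih _ _ _ hneB hnodupB
          rw [PySem.Dict.items_insert_of_contains d none hcd', h1, hitemsB,
              List.map_map, List.map_map]
          apply List.map_congr_left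
          intro q hq
          by_cases hk : (q.1 == sn) = true
          · have hk' : q.1 = sn := by simpa using hk
            have hq' : (sn, q.2) ∈ g.items := by rw [← hk']; exact hq
            have hq2 : q.2 = v := pv_value_unique g h3 hq' hv
            simp only [Function.comp, hk, if_true]
            rw [pvCollapse_append_none p.1 hvne heq]
          · have hk' : q.1 ≠ sn := by simpa using hk
            simp [hk']
      · -- fresh key: both append
        have hc' : g.contains sn = false := by simpa using hc
        have hcd' : d.contains sn = false := by rw [hcd]; exact hc'
        have hA : pvStepA file_path d p = d.insert sn (some p.1) := by
          simp [pvStepA, hfp, ← hsn, hcd']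
        have hget0 : g.getD sn [] = [] := PySem.Dict.getD_of_not_contains g [] hc'
        rw [hA]
        apply ih
        · rw [PySem.Dict.items_insert_of_not_contains d _ hcd', hB, hget0,
              PySem.Dict.items_insert_of_not_contains g _ hc', h1, List.map_append]
          simp [pvCollapse_singleton]
        · intro q hq
          rw [hB, hget0, PySem.Dict.items_insert_of_not_contains g _ hc'] at hq
          rcases List.mem_append.mp hq with h | h
          · exact h2 _ h
          · simp at h; rw [h]; simp
        · rw [hB]; exact PySem.Dict.nodup_keys_insert g _ _ h3
    · -- entry for another file: both skip it
      have hA : pvStepA file_path d p = d := by simp [pvStepA, hfp]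
      have hB : pvStepB file_path g p = g := by simp [pvStepB, hfp]
      rw [hA, hB]; exact ih g d h1 h2 h3

-- ===== VERDICT (by name: the statement is the Claim_ definition above) =====
theorem build_file_name_index_py_spec : Claim_equal_build_file_name_index_py := by
  intro entity_files file_path _
  unfold Spec_build_file_name_index_py build_file_name_index_py build_file_name_index_py_alt
  exact pv_inv_fold file_path entity_files PySem.Dict.empty PySem.Dict.empty rfl
    (by intro q hq; simp [PySem.Dict.empty] at hq)
    PySem.Dict.nodup_keys_empty
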